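-- pv_equiv track=rewrite | github.com/Rafael-Sapienza/computacao | programas/1Semestre/projetoAPC/projeto_v2.py | ondeEstaoAsAspas
-- ===== SOURCE A (Python) =====
-- def ondeEstaoAsAspas(stringOriginal):
--     simboloDePontuacao = ['.',',']
--     posicaoAspasSemPar = []
--     posicaoAspasComPar = []
--     errosDePontuacaoAdicionais = []
--     for i,item in enumerate(stringOriginal):
--         if item == '"':
--             posicaoAspasSemPar.append(i)
--             if i >= 1:
--                 if stringOriginal[i-1] != ' ' and len(posicaoAspasSemPar) == 1:
--                     errosDePontuacaoAdicionais.append(i)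
--
--
--             if len(posicaoAspasSemPar) == 2:
--                 posicaoAspasComPar.append(posicaoAspasSemPar)
--                 if i >= 1:
--                     if stringOriginal[i-1] in simboloDePontuacao:
--                         errosDePontuacaoAdicionais.append(i)
--                 posicaoAspasSemPar = []
--     return posicaoAspasComPar,posicaoAspasSemPar,errosDePontuacaoAdicionais
-- ===== SOURCE B (Python) =====
-- def ondeEstaoAsAspas(stringOriginal):
--     # collect all quote positions once, then pair them up consecutively
--     posicoes = [i for i, c in enumerate(stringOriginal) if c == '"']
--     posicaoAspasComPar = []
--     errosDePontuacaoAdicionais = []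
--     k = 0
--     while k + 1 < len(posicoes):
--         abre, fecha = posicoes[k], posicoes[k + 1]
--         if abre >= 1 and stringOriginal[abre - 1] != ' ':
--             errosDePontuacaoAdicionais.append(abre)
--         posicaoAspasComPar.append([abre, fecha])
--         if fecha >= 1 and stringOriginal[fecha - 1] in ('.', ','):
--             errosDePontuacaoAdicionais.append(fecha)
--         k += 2
--     posicaoAspasSemPar = posicoes[k:]
--     if posicaoAspasSemPar:
--         abre = posicaoAspasSemPar[0]
--         if abre >= 1 and stringOriginal[abre - 1] != ' ':
--             errosDePontuacaoAdicionais.append(abre)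
--     return posicaoAspasComPar, posicaoAspasSemPar, errosDePontuacaoAdicionais
-- ===== Notes on version B (the rewrite author's own statement) =====
-- stated objective: alternative
-- what changed: Replaced A's single interleaved scan carrying an open/close buffer by a two-phase pass: collect all quote positions with a comprehension, then pair consecutive positions (even=opening, odd=closing) in a separate loop, handling the leftover unpaired quote after the loop.
import Mathlib
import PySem

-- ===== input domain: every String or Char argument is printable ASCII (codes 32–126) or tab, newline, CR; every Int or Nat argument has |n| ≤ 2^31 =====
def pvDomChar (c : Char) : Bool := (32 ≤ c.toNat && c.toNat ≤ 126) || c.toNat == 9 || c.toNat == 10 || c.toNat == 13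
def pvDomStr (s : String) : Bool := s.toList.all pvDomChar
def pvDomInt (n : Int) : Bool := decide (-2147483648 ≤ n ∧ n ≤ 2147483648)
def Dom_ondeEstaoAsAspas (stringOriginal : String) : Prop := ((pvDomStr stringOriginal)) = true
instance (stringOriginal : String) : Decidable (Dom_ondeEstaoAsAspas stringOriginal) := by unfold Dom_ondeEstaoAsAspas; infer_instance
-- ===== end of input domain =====

-- B replaces A's single scan with an interleaved open/close buffer by a collect-the-quote-positions
-- pass followed by a pairing loop over consecutive quote positions (objective: alternative decomposition).

-- stringOriginal[i-1]: the guards ensure 1 ≤ i and i is an enumerate index, so i-1 is always in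
-- range; pyGet? therefore returns some, and the .getD ' ' default is never used (exact).
def pvPrev (cs : List Char) (i : Int) : Char := (PySem.List.pyGet? cs (i - 1)).getD ' '

-- ===== PORT A =====
def ondeEstaoAsAspas (stringOriginal : String) : List (List Int) × List Int × List Int :=
  let cs := stringOriginal.toList
  (PySem.List.enumerate cs).foldl
    (fun acc ic =>
      let com := acc.1
      let sem := acc.2.1
      let err := acc.2.2
      let i := ic.1
      let item := ic.2
      if item = '"' then
        let sem := sem ++ [i]
        let err := if 1 ≤ i ∧ pvPrev cs i ≠ ' ' ∧ sem.length = 1 then err ++ [i] else err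
        if sem.length = 2 then
          let com := com ++ [sem]
          let err := if 1 ≤ i ∧ (pvPrev cs i = '.' ∨ pvPrev cs i = ',') then err ++ [i] else err
          (com, ([] : List Int), err)
        else (com, sem, err)
      else acc)
    ([], [], [])

-- ===== PORT B =====
-- phase 1: the comprehension collecting all quote positions
def pvQuotes (cs : List Char) : List Int :=
  (PySem.List.enumerate cs).filterMap (fun ic => if ic.2 = '"' then some ic.1 else none)

-- phase 2: the while loop consuming two quote positions per step, plus the leftover handling
def pvPairLoop (cs : List Char) : List Int → List (List Int) × List Int × List Int
  | abre :: fecha :: rest =>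
      let eo : List Int := if 1 ≤ abre ∧ pvPrev cs abre ≠ ' ' then [abre] else []
      let ec : List Int := if 1 ≤ fecha ∧ (pvPrev cs fecha = '.' ∨ pvPrev cs fecha = ',') then [fecha] else []
      let r := pvPairLoop cs rest
      ([abre, fecha] :: r.1, r.2.1, eo ++ ec ++ r.2.2)
  | [abre] => ([], [abre], if 1 ≤ abre ∧ pvPrev cs abre ≠ ' ' then [abre] else [])
  | [] => ([], [], [])

def ondeEstaoAsAspas_alt (stringOriginal : String) : List (List Int) × List Int × List Int :=
  let cs := stringOriginal.toList
  pvPairLoop cs (pvQuotes cs)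

-- ===== PRECONDITION & SPEC =====
def Spec_ondeEstaoAsAspas (stringOriginal : String) (out : List (List Int) × List Int × List Int) : Prop := out = ondeEstaoAsAspas_alt stringOriginal
instance (stringOriginal : String) (out : List (List Int) × List Int × List Int) : Decidable (Spec_ondeEstaoAsAspas stringOriginal out) := by unfold Spec_ondeEstaoAsAspas; infer_instance

-- ===== CLAIM (what is proved, stated in full; the proofs are below) =====
def Claim_equal_ondeEstaoAsAspas : Prop := ∀ (stringOriginal : String), Dom_ondeEstaoAsAspas stringOriginal → Spec_ondeEstaoAsAspas stringOriginal (ondeEstaoAsAspas stringOriginal)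

-- ===== LEMMAS AND PROOFS =====

-- A's loop step, named so the fold can be reasoned about
def pvStepA (cs : List Char) (acc : List (List Int) × List Int × List Int) (ic : Int × Char) :
    List (List Int) × List Int × List Int :=
  let com := acc.1
  let sem := acc.2.1
  let err := acc.2.2
  let i := ic.1
  let item := ic.2
  if item = '"' then
    let sem := sem ++ [i]
    let err := if 1 ≤ i ∧ pvPrev cs i ≠ ' ' ∧ sem.length = 1 then err ++ [i] else err
    if sem.length = 2 then
      let com := com ++ [sem]
      let err := if 1 ≤ i ∧ (pvPrev cs i = '.' ∨ pvPrev cs i = ',') then err ++ [i] else err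
      (com, ([] : List Int), err)
    else (com, sem, err)
  else acc

lemma ondeEstaoAsAspas_eq_fold (s : String) :
    ondeEstaoAsAspas s =
      (PySem.List.enumerate s.toList).foldl (pvStepA s.toList) ([], [], []) := rfl

-- quote positions of an arbitrary (index, char) list
def pvQuotesOf (l : List (Int × Char)) : List Int :=
  l.filterMap (fun ic => if ic.2 = '"' then some ic.1 else none)

-- the pairing loop when an opening quote p is already pending (its opening-error already emitted)
def pvPendLoop (cs : List Char) (p : Int) : List Int → List (List Int) × List Int × List Int
  | [] => ([], [p], [])
  | fecha :: rest =>
      let ec : List Int := if 1 ≤ fecha ∧ (pvPrev cs fecha = '.' ∨ pvPrev cs fecha = ',') then [fecha] else []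
      let r := pvPairLoop cs rest
      ([p, fecha] :: r.1, r.2.1, ec ++ r.2.2)

lemma pvPairLoop_cons (cs : List Char) (p : Int) (qs : List Int) :
    pvPairLoop cs (p :: qs) =
      ((pvPendLoop cs p qs).1, (pvPendLoop cs p qs).2.1,
        (if 1 ≤ p ∧ pvPrev cs p ≠ ' ' then [p] else []) ++ (pvPendLoop cs p qs).2.2) := by
  cases qs <;> simp [pvPairLoop, pvPendLoop]

lemma pvMain (cs : List Char) (l : List (Int × Char)) :
    (∀ com err, l.foldl (pvStepA cs) (com, [], err) =
        (com ++ (pvPairLoop cs (pvQuotesOf l)).1, (pvPairLoop cs (pvQuotesOf l)).2.1,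
          err ++ (pvPairLoop cs (pvQuotesOf l)).2.2)) ∧
    (∀ com err p, l.foldl (pvStepA cs) (com, [p], err) =
        (com ++ (pvPendLoop cs p (pvQuotesOf l)).1, (pvPendLoop cs p (pvQuotesOf l)).2.1,
          err ++ (pvPendLoop cs p (pvQuotesOf l)).2.2)) := by
  induction l with
  | nil => simp [pvQuotesOf, pvPairLoop, pvPendLoop]
  | cons hd tl ih =>
    obtain ⟨ih1, ih2⟩ := ih
    constructor
    · intro com err
      by_cases hq : hd.2 = '"'
      · have hqo : pvQuotesOf (hd :: tl) = hd.1 :: pvQuotesOf tl := by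
          simp [pvQuotesOf, hq]
        have hstep : pvStepA cs (com, [], err) hd =
            (com, [hd.1], if 1 ≤ hd.1 ∧ pvPrev cs hd.1 ≠ ' ' then err ++ [hd.1] else err) := by
          simp [pvStepA, hq]
        rw [List.foldl_cons, hstep, ih2, hqo, pvPairLoop_cons]
        by_cases hc : 1 ≤ hd.1 ∧ pvPrev cs hd.1 ≠ ' ' <;> simp [hc]
      · have hqo : pvQuotesOf (hd :: tl) = pvQuotesOf tl := by
          simp [pvQuotesOf, hq]
        have hstep : pvStepA cs (com, [], err) hd = (com, [], err) := by
          simp [pvStepA, hq]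
        rw [List.foldl_cons, hstep, ih1, hqo]
    · intro com err p
      by_cases hq : hd.2 = '"'
      · have hqo : pvQuotesOf (hd :: tl) = hd.1 :: pvQuotesOf tl := by
          simp [pvQuotesOf, hq]
        have hstep : pvStepA cs (com, [p], err) hd =
            (com ++ [[p, hd.1]], [],
              if 1 ≤ hd.1 ∧ (pvPrev cs hd.1 = '.' ∨ pvPrev cs hd.1 = ',') then err ++ [hd.1] else err) := by
          simp [pvStepA, hq]
        rw [List.foldl_cons, hstep, ih1, hqo]
        by_cases hc : 1 ≤ hd.1 ∧ (pvPrev cs hd.1 = '.' ∨ pvPrev cs hd.1 = ',') <;>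
          simp [pvPendLoop, hc]
      · have hqo : pvQuotesOf (hd :: tl) = pvQuotesOf tl := by
          simp [pvQuotesOf, hq]
        have hstep : pvStepA cs (com, [p], err) hd = (com, [p], err) := by
          simp [pvStepA, hq]
        rw [List.foldl_cons, hstep, ih2, hqo]

-- ===== VERDICT (by name: the statement is the Claim_ definition above) =====
theorem ondeEstaoAsAspas_spec : Claim_equal_ondeEstaoAsAspas := by
  intro s _
  unfold Spec_ondeEstaoAsAspas
  rw [ondeEstaoAsAspas_eq_fold]
  have h := (pvMain s.toList (PySem.List.enumerate s.toList)).1 [] []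
  simp at h
  rw [h]
  rfl
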